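-- pv_equiv track=rewrite | github.com/SukantoMette/Shortest_Path_and_network_equillibrium_algorithms | user_equilibrium_algorithms.py | new_dict
-- ===== SOURCE A (Python) =====
-- def new_dict(arcs, time):
--         '''
--
--         :param arcs:
--         :param time:
--         :return: new downstream node dict
--         '''
--         new_downstream_node_dict = {}
--         for a in range(len(arcs)):
--             temp = []
--             for b in range(len(arcs)):
--                 if (arcs[a][0] == arcs[b][0]):
--                     temp.append([arcs[b][1], time[b]])
--             add = {arcs[a][0]: temp}
--             new_downstream_node_dict.update(add)
--         return new_downstream_node_dict
-- ===== SOURCE B (Python) =====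
-- def new_dict(arcs, time):
--     d = {}
--     for arc, t in zip(arcs, time):
--         d.setdefault(arc[0], []).append([arc[1], t])
--     return d
-- ===== Notes on version B (the rewrite author's own statement) =====
-- stated objective: alternative
-- what changed: Replaces the quadratic double loop (recomputing the whole group for every arc) by a single pass that appends each arc's [dest, time] to a dict-of-lists keyed by source node.
import Mathlib
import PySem

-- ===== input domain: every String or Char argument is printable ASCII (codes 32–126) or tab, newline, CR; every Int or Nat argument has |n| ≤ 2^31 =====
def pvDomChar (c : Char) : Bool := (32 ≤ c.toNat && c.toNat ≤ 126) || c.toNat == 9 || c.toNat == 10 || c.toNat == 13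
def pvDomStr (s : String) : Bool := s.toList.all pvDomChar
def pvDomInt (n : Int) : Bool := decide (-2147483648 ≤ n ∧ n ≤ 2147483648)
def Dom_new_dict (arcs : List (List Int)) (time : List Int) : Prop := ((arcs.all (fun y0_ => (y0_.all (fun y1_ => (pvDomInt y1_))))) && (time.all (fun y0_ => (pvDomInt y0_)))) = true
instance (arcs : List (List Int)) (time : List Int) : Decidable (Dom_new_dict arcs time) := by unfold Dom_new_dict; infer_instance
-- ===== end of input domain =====

-- B replaces A's double loop (which recomputes the whole group for every arc) by a single
-- pass appending each arc's [dest, time] to a dict-of-lists keyed by source node.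

-- ===== PORT A =====
def new_dict (arcs : List (List Int)) (time : List Int) : List (Int × List (List Int)) :=
  ((PySem.List.pyRange 0 (arcs.length : Int) 1).foldl (fun d a =>
      d.insert (PySem.List.pyGetD (PySem.List.pyGetD arcs a []) 0 0)
        ((PySem.List.pyRange 0 (arcs.length : Int) 1).foldl (fun temp b =>
            if PySem.List.pyGetD (PySem.List.pyGetD arcs a []) 0 0 ==
               PySem.List.pyGetD (PySem.List.pyGetD arcs b []) 0 0 then
              temp ++ [[PySem.List.pyGetD (PySem.List.pyGetD arcs b []) 1 0,
                        PySem.List.pyGetD time b 0]]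
            else temp) []))
    PySem.Dict.empty).items

-- ===== PORT B =====
def new_dict_alt (arcs : List (List Int)) (time : List Int) : List (Int × List (List Int)) :=
  ((arcs.zip time).foldl (fun d p =>
      d.modify (PySem.List.pyGetD p.1 0 0) []
        (· ++ [[PySem.List.pyGetD p.1 1 0, p.2]]))
    PySem.Dict.empty).items

-- ===== PRECONDITION & SPEC =====
-- Pre_ excludes exactly the inputs on which A raises IndexError: an arc row with fewer
-- than two entries, or a time list shorter than arcs (A reads time[b] for every index b).
def Pre_new_dict (arcs : List (List Int)) (time : List Int) : Prop :=
  (∀ r ∈ arcs, 2 ≤ r.length) ∧ arcs.length ≤ time.length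
instance (arcs : List (List Int)) (time : List Int) : Decidable (Pre_new_dict arcs time) := by
  unfold Pre_new_dict; infer_instance

def pvWitness_new_dict : List (List Int) × List Int := ([[0, 1], [0, 2], [1, 3]], [5, 6, 7])

def Spec_new_dict (arcs : List (List Int)) (time : List Int) (out : List (Int × List (List Int))) : Prop := out = new_dict_alt arcs time
instance (arcs : List (List Int)) (time : List Int) (out : List (Int × List (List Int))) : Decidable (Spec_new_dict arcs time out) := by unfold Spec_new_dict; infer_instance

-- ===== CLAIM (what is proved, stated in full; the proofs are below) =====
def Claim_equal_new_dict : Prop := ∀ (arcs : List (List Int)) (time : List Int), Dom_new_dict arcs time → Pre_new_dict arcs time → Spec_new_dict arcs time (new_dict arcs time)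

-- ===== LEMMAS AND PROOFS =====

-- named views of the two folds (definitionally equal to the ports)
def pvKey (r : List Int) : Int := PySem.List.pyGetD r 0 0

def pvVal (p : List Int × Int) : List Int := [PySem.List.pyGetD p.1 1 0, p.2]

def pvInnerA (arcs : List (List Int)) (time : List Int) (k : Int) : List (List Int) :=
  (PySem.List.pyRange 0 (arcs.length : Int) 1).foldl (fun temp b =>
      if k == pvKey (PySem.List.pyGetD arcs b []) then
        temp ++ [[PySem.List.pyGetD (PySem.List.pyGetD arcs b []) 1 0,
                  PySem.List.pyGetD time b 0]]
      else temp) []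

def pvDictA (arcs : List (List Int)) (time : List Int) : PySem.Dict Int (List (List Int)) :=
  (PySem.List.pyRange 0 (arcs.length : Int) 1).foldl (fun d a =>
      d.insert (pvKey (PySem.List.pyGetD arcs a []))
               (pvInnerA arcs time (pvKey (PySem.List.pyGetD arcs a []))))
    PySem.Dict.empty

def pvDictB (arcs : List (List Int)) (time : List Int) : PySem.Dict Int (List (List Int)) :=
  (arcs.zip time).foldl (fun d p => d.modify (pvKey p.1) [] (· ++ [pvVal p]))
    PySem.Dict.empty

theorem pvA_eq (arcs : List (List Int)) (time : List Int) :
    new_dict arcs time = (pvDictA arcs time).items := rfl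

theorem pvB_eq (arcs : List (List Int)) (time : List Int) :
    new_dict_alt arcs time = (pvDictB arcs time).items := rfl

-- a fold of inserts whose value depends only on the inserted key: final lookup
theorem getD_foldl_insert_keyfn {α κ ν : Type} [BEq κ] [LawfulBEq κ]
    (l : List α) (key : α → κ) (F : κ → ν) (d : PySem.Dict κ ν) (d0 : ν) (k : κ) :
    (l.foldl (fun d x => d.insert (key x) (F (key x))) d).getD k d0 =
      if k ∈ l.map key then F k else d.getD k d0 := by
  induction l generalizing d with
  | nil => simp
  | cons x l ih =>
    simp only [List.foldl_cons, ih, List.map_cons, List.mem_cons]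
    by_cases hk : k ∈ l.map key
    · simp [hk]
    · by_cases hx : k = key x
      · subst hx; simp [hk, PySem.Dict.getD_insert_self]
      · simp [hk, hx, PySem.Dict.getD_insert_of_ne _ _ _ hx]

theorem new_dict_spec' (arcs : List (List Int)) (time : List Int)
    (hpre : Pre_new_dict arcs time) : new_dict arcs time = new_dict_alt arcs time := by
  obtain ⟨hrows, hlen⟩ := hpre
  set zs := arcs.zip time with hzs
  have hz : zs.length = arcs.length := by simp [hzs, List.length_zip]; omega
  have hget : ∀ b ∈ PySem.List.pyRange 0 (arcs.length : Int) 1,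
      PySem.List.pyGetD zs b (([] : List Int), (0 : Int)) =
        (PySem.List.pyGetD arcs b [], PySem.List.pyGetD time b 0) := by
    intro b hb
    rw [PySem.List.mem_pyRange_one] at hb
    rw [PySem.List.pyGetD_eq_getElem zs (([] : List Int), (0 : Int)) hb.1 (by omega),
        PySem.List.pyGetD_eq_getElem arcs ([] : List Int) hb.1 (by exact_mod_cast hb.2),
        PySem.List.pyGetD_eq_getElem time (0 : Int) hb.1 (by omega)]
    simp [hzs]
  -- the key sequences of the two folds coincide
  have hkeys : (PySem.List.pyRange 0 (arcs.length : Int) 1).map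
        (fun a => pvKey (PySem.List.pyGetD arcs a [])) = zs.map (fun p => pvKey p.1) := by
    have h1 : (PySem.List.pyRange 0 (arcs.length : Int) 1).map
          (fun a => pvKey (PySem.List.pyGetD arcs a [])) =
        (PySem.List.pyRange 0 (arcs.length : Int) 1).map
          (fun a => pvKey (PySem.List.pyGetD zs a ([], 0)).1) :=
      List.map_congr_left (fun b hb => by rw [hget b hb])
    rw [h1, hz.symm]
    have h2 := PySem.List.map_pyGetD_pyRange_zero' zs (([] : List Int), (0 : Int))
    calc (PySem.List.pyRange 0 (zs.length : Int) 1).map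
            (fun a => pvKey (PySem.List.pyGetD zs a ([], 0)).1)
        = ((PySem.List.pyRange 0 (zs.length : Int) 1).map
            (fun a => PySem.List.pyGetD zs a ([], 0))).map (fun p => pvKey p.1) :=
          by rw [List.map_map]; rfl
      _ = zs.map (fun p => pvKey p.1) := by rw [h2]
  -- A's inner loop is a filter over zs
  have hF : ∀ k : Int, pvInnerA arcs time k =
      (zs.filter (fun p => pvKey p.1 == k)).map pvVal := by
    intro k
    have h1 : pvInnerA arcs time k =
        (PySem.List.pyRange 0 (arcs.length : Int) 1).foldl (fun temp b =>
          (fun (temp : List (List Int)) (p : List Int × Int) =>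
            if k == pvKey p.1 then temp ++ [pvVal p] else temp) temp
            (PySem.List.pyGetD zs b ([], 0))) [] :=
      PySem.List.foldl_congr_mem' _ _ _ _ (fun b hb acc => by
        rw [hget b hb]; rfl)
    rw [h1, hz.symm]
    rw [PySem.List.foldl_pyRange_zero_pyGetD' zs (([] : List Int), (0 : Int))
          (fun temp p => if k == pvKey p.1 then temp ++ [pvVal p] else temp) []]
    rw [PySem.List.foldl_append_if (fun p => k == pvKey p.1) pvVal]
    rw [List.filter_congr (fun p _ => by
      show (k == pvKey p.1) = (pvKey p.1 == k)
      simp [eq_comm])]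
    simp
  -- the dictionaries have equal item lists
  rw [pvA_eq, pvB_eq]
  have hndA : (pvDictA arcs time).keys.Nodup := by
    unfold pvDictA
    exact PySem.Dict.nodup_keys_foldl_insert_key _ _ _ _ PySem.Dict.nodup_keys_empty
  have hndB : (pvDictB arcs time).keys.Nodup := by
    unfold pvDictB
    exact PySem.Dict.nodup_keys_foldl_modify_key _ _ _ _ _ PySem.Dict.nodup_keys_empty
  rw [PySem.Dict.items_eq_map_keys _ hndA ([] : List (List Int)),
      PySem.Dict.items_eq_map_keys _ hndB ([] : List (List Int))]
  have hkeysA : (pvDictA arcs time).keys = PySem.Set.ofList (zs.map (fun p => pvKey p.1)) := by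
    unfold pvDictA
    rw [PySem.Dict.keys_foldl_insert_key _ (fun a => pvKey (PySem.List.pyGetD arcs a [])) _ _,
        PySem.Dict.keys_empty, PySem.Set.update_nil_left, hkeys]
  have hkeysB : (pvDictB arcs time).keys = PySem.Set.ofList (zs.map (fun p => pvKey p.1)) := by
    unfold pvDictB
    rw [PySem.Dict.keys_foldl_modify_key _ (fun p => pvKey p.1) ([] : List (List Int))
          (fun _ p => (· ++ [pvVal p])) _,
        PySem.Dict.keys_empty, PySem.Set.update_nil_left]
  rw [hkeysA, hkeysB]
  apply List.map_congr_left
  intro k hk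
  rw [PySem.Set.mem_ofList] at hk
  congr 1
  -- A's lookup of k
  have hgA : (pvDictA arcs time).getD k [] = pvInnerA arcs time k := by
    unfold pvDictA
    rw [getD_foldl_insert_keyfn (PySem.List.pyRange 0 (arcs.length : Int) 1)
          (fun a => pvKey (PySem.List.pyGetD arcs a [])) (pvInnerA arcs time)
          PySem.Dict.empty ([] : List (List Int)) k]
    rw [if_pos (by rw [hkeys]; exact hk)]
  -- B's lookup of k
  have hgB : (pvDictB arcs time).getD k [] =
      (zs.filter (fun p => pvKey p.1 == k)).map pvVal := by
    unfold pvDictB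
    have h1 : (zs.foldl (fun d p => d.modify (pvKey p.1) [] (· ++ [pvVal p]))
          PySem.Dict.empty) =
        ((zs.map (fun p => (pvKey p.1, pvVal p))).foldl
          (fun d q => d.modify q.1 [] (· ++ [q.2])) PySem.Dict.empty) :=
      by rw [List.foldl_map]
    rw [h1, PySem.Dict.getD_foldl_modify_append, PySem.Dict.getD_empty, List.nil_append,
        List.filter_map]
    simp [Function.comp_def]
  rw [hgA, hgB, hF k]

-- ===== VERDICT (by name: the statement is the Claim_ definition above) =====
theorem new_dict_spec : Claim_equal_new_dict := by
  intro arcs time _ hpre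
  exact new_dict_spec' arcs time hpre
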